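-- pv_equiv track=rewrite | github.com/aymantaha-dev/Kivode-Plus | src/main/python/assistant_env.py | _find_subsequence
-- ===== SOURCE A (Python) =====
-- from typing import Any, Dict, List, Tuple
--
-- def _find_subsequence(lines: List[str], pattern: List[str], start: int = 0, normalize_ws: bool = False) -> int:
--     if not pattern:
--         return start
--
--     def norm(v: str) -> str:
--         if not normalize_ws:
--             return v
--         return ' '.join(v.strip().split())
--
--     limit = len(lines) - len(pattern) + 1
--     for i in range(max(0, start), max(0, limit)):
--         ok_match = True
--         for j, p in enumerate(pattern):
--             if norm(lines[i + j]) != norm(p):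
--                 ok_match = False
--                 break
--         if ok_match:
--             return i
--     return -1
-- ===== SOURCE B (Python) =====
-- from typing import List
--
-- def _find_subsequence(lines: List[str], pattern: List[str], start: int = 0, normalize_ws: bool = False) -> int:
--     if not pattern:
--         return start
--     if normalize_ws:
--         nl = [' '.join(v.strip().split()) for v in lines]
--         np = [' '.join(p.strip().split()) for p in pattern]
--     else:
--         nl, np = lines, pattern
--     m = len(np)
--     i = max(0, start)
--     tail = nl[i:]
--     while len(tail) >= m:
--         if tail[:m] == np:
--             return i
--         tail = tail[1:]
--         i += 1
--     return -1
-- ===== Notes on version B (the rewrite author's own statement) =====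
-- stated objective: alternative
-- what changed: B normalizes every line and the pattern exactly once up front and then scans suffixes of the normalized list comparing whole windows with slice equality, instead of A's nested index loop that normalizes both the line and the pattern element inside every comparison.
import Mathlib
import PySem

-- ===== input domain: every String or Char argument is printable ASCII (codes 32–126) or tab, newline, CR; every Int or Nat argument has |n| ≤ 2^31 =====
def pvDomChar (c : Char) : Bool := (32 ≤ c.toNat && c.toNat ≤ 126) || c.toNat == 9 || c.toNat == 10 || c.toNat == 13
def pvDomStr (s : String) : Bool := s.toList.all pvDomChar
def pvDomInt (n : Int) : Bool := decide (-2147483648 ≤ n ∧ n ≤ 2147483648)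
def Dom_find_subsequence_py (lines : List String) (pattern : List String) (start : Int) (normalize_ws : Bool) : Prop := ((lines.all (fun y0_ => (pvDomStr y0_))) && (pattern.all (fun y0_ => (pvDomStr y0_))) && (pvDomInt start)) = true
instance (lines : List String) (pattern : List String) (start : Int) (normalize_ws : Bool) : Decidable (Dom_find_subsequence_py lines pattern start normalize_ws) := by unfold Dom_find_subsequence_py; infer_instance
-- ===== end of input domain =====

-- B normalizes all lines and the pattern once up front and scans the suffixes of the
-- normalized list comparing whole windows, instead of A's nested index loop that
-- normalizes both sides inside every element comparison (objective: alternative).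

-- ===== PORT A =====
-- norm(v): ' '.join(v.strip().split()) when normalize_ws else v
def pvNormA (normalize_ws : Bool) (v : String) : String :=
  if !normalize_ws then v
  else PySem.Str.join " " (PySem.Str.split₀ (PySem.Str.strip v))

-- inner 'for j, p in enumerate(pattern)' with early break; lines[i+j] via pyGet?
-- (in A the index is always in range, so the none branch is never reached)
def pvOkA (lines : List String) (nw : Bool) (i : Int) : List String → Int → Bool
  | [], _ => true
  | p :: ps, j =>
    if (PySem.List.pyGet? lines (i + j)).map (pvNormA nw) ≠ some (pvNormA nw p) then false
    else pvOkA lines nw i ps (j + 1)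

-- outer 'for i in range(max(0,start), max(0,limit))' with early return
def pvLoopA (lines pattern : List String) (nw : Bool) : List Int → Int
  | [] => -1
  | i :: rest => if pvOkA lines nw i pattern 0 then i else pvLoopA lines pattern nw rest

def find_subsequence_py (lines : List String) (pattern : List String) (start : Int) (normalize_ws : Bool) : Int :=
  if pattern = [] then start
  else
    let limit : Int := (lines.length : Int) - (pattern.length : Int) + 1
    pvLoopA lines pattern normalize_ws (PySem.List.pyRange (max 0 start) (max 0 limit) 1)

-- ===== PORT B =====
def pvNormB (v : String) : String :=
  PySem.Str.join " " (PySem.Str.split₀ (PySem.Str.strip v))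

-- 'while len(tail) >= m: if tail[:m] == np: return i; tail = tail[1:]; i += 1'
def pvScanB (np : List String) : List String → Int → Int
  | [], i => if np.length ≤ 0 then i else -1
  | v :: rest, i =>
    if np.length ≤ rest.length + 1 then
      if List.take np.length (v :: rest) = np then i
      else pvScanB np rest (i + 1)
    else -1

def find_subsequence_py_alt (lines : List String) (pattern : List String) (start : Int) (normalize_ws : Bool) : Int :=
  if pattern = [] then start
  else
    let nl := if normalize_ws then lines.map pvNormB else lines
    let np := if normalize_ws then pattern.map pvNormB else pattern
    let i : Int := max 0 start
    pvScanB np (PySem.List.slice nl (some i) none) i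

-- ===== PRECONDITION & SPEC =====
def Spec_find_subsequence_py (lines : List String) (pattern : List String) (start : Int) (normalize_ws : Bool) (out : Int) : Prop := out = find_subsequence_py_alt lines pattern start normalize_ws
instance (lines : List String) (pattern : List String) (start : Int) (normalize_ws : Bool) (out : Int) : Decidable (Spec_find_subsequence_py lines pattern start normalize_ws out) := by unfold Spec_find_subsequence_py; infer_instance

-- ===== CLAIM (what is proved, stated in full; the proofs are below) =====
def Claim_equal_find_subsequence_py : Prop := ∀ (lines : List String) (pattern : List String) (start : Int) (normalize_ws : Bool), Dom_find_subsequence_py lines pattern start normalize_ws → Spec_find_subsequence_py lines pattern start normalize_ws (find_subsequence_py lines pattern start normalize_ws)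

-- ===== LEMMAS AND PROOFS =====

-- B's precomputed inputs are exactly lines/pattern mapped through A's norm
theorem pvMapNorm (nw : Bool) (xs : List String) :
    (if nw then xs.map pvNormB else xs) = xs.map (pvNormA nw) := by
  cases nw
  · induction xs with
    | nil => simp
    | cons x l ih => simpa [pvNormA] using ih
  · simp [pvNormA, pvNormB]

-- A's inner loop is a window comparison on the normalized lists
theorem pvOkA_eq (lines : List String) (nw : Bool) (ps : List String) (i : Nat) :
    ∀ j : Nat, pvOkA lines nw (i : Int) ps (j : Int)
      = decide ((((lines.map (pvNormA nw)).drop (i + j)).take ps.length)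
                 = ps.map (pvNormA nw)) := by
  induction ps with
  | nil => intro j; simp [pvOkA]
  | cons p ps ih =>
    intro j
    by_cases h : i + j < lines.length
    · have hget : PySem.List.pyGet? lines ((i : Int) + (j : Int)) = some lines[i + j] := by
        have := PySem.List.pyGet?_natCast lines (i + j)
        push_cast at this ⊢
        simpa [List.getElem?_eq_getElem h] using this
      have hdrop : (lines.map (pvNormA nw)).drop (i + j)
          = pvNormA nw lines[i + j] :: (lines.map (pvNormA nw)).drop (i + j + 1) := by
        have hlen : i + j < (lines.map (pvNormA nw)).length := by simpa using h
        simpa using List.drop_eq_getElem_cons hlen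
      by_cases hq : pvNormA nw lines[i + j] = pvNormA nw p
      · have hrec := ih (j + 1)
        simp only [pvOkA, hget, Option.map_some]
        rw [if_neg (by simp [hq])]
        rw [show ((j : Int) + 1) = (((j + 1 : Nat)) : Int) by push_cast; ring, hrec, hdrop]
        simp [hq, Nat.add_assoc]
      · simp only [pvOkA, hget, Option.map_some]
        rw [if_pos (by simp [hq]), hdrop]
        simp [hq]
    · have hget : PySem.List.pyGet? lines ((i : Int) + (j : Int)) = none := by
        have := PySem.List.pyGet?_natCast lines (i + j)
        push_cast at this
        simpa [List.getElem?_eq_none (by omega : lines.length ≤ i + j)] using this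
      have hdrop : (lines.map (pvNormA nw)).drop (i + j) = [] := by
        apply List.drop_eq_nil_of_le; simpa using Nat.le_of_not_lt h
      simp [pvOkA, hget, hdrop]

-- A's outer loop over range(i, max(0, limit)) equals B's suffix scan, for any start index i
theorem pvMain (lines pattern : List String) (nw : Bool) (hp : pattern ≠ []) :
    ∀ fuel i : Nat, lines.length ≤ i + fuel →
      pvLoopA lines pattern nw
          (PySem.List.pyRange (i : Int)
            (max 0 ((lines.length : Int) - (pattern.length : Int) + 1)) 1)
        = pvScanB (pattern.map (pvNormA nw)) ((lines.map (pvNormA nw)).drop i) (i : Int) := by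
  have hm1 : 1 ≤ pattern.length := by
    cases pattern with
    | nil => exact absurd rfl hp
    | cons a l => simp
  intro fuel
  induction fuel with
  | zero =>
    intro i hi
    -- i ≥ len(lines), so no window fits: both sides are -1
    have hb : max 0 ((lines.length : Int) - (pattern.length : Int) + 1) ≤ (i : Int) := by omega
    rw [PySem.List.pyRange_one_eq_nil hb]
    have hdrop : (lines.map (pvNormA nw)).drop i = [] := by
      apply List.drop_eq_nil_of_le; simpa using (by omega : lines.length ≤ i)
    rw [hdrop]
    simp [pvLoopA, pvScanB, hp]
  | succ fuel ih =>
    intro i hi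
    by_cases hw : i + pattern.length ≤ lines.length
    · -- a window fits at i
      have hb : (i : Int) < max 0 ((lines.length : Int) - (pattern.length : Int) + 1) := by omega
      rw [PySem.List.pyRange_one_cons hb]
      have hok := pvOkA_eq lines nw pattern i 0
      have hin' : i < (lines.map (pvNormA nw)).length := by simpa using (by omega : i < lines.length)
      have hdrop := List.drop_eq_getElem_cons hin'
      simp only [pvLoopA]
      rw [hdrop]
      simp only [pvScanB]
      have hcond : (pattern.map (pvNormA nw)).length
          ≤ ((lines.map (pvNormA nw)).drop (i + 1)).length + 1 := by
        simp; omega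
      rw [if_pos hcond]
      have htake : List.take (pattern.map (pvNormA nw)).length
            ((lines.map (pvNormA nw))[i] :: (lines.map (pvNormA nw)).drop (i + 1))
          = ((lines.map (pvNormA nw)).drop i).take pattern.length := by
        rw [hdrop]; simp
      rw [htake]
      by_cases heq : ((lines.map (pvNormA nw)).drop i).take pattern.length
          = pattern.map (pvNormA nw)
      · rw [if_pos heq]
        have hokt : pvOkA lines nw (i : Int) pattern 0 = true := by
          rw [show ((0 : Int)) = ((0 : Nat) : Int) by simp, hok]; simp [heq]
        simp [hokt]
      · rw [if_neg heq]
        have hokf : pvOkA lines nw (i : Int) pattern 0 = false := by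
          rw [show ((0 : Int)) = ((0 : Nat) : Int) by simp, hok]; simp [heq]
        simp only [hokf, Bool.false_eq_true, if_false]
        rw [show ((i : Int) + 1) = (((i + 1 : Nat)) : Int) by push_cast; ring]
        exact ih (i + 1) (by omega)
    · -- no window fits at i or later: both sides -1
      have hb : max 0 ((lines.length : Int) - (pattern.length : Int) + 1) ≤ (i : Int) := by omega
      rw [PySem.List.pyRange_one_eq_nil hb]
      simp only [pvLoopA]
      cases hdrop : (lines.map (pvNormA nw)).drop i with
      | nil => simp [pvScanB, hp]
      | cons v rest =>
        have hlen : rest.length + 1 = lines.length - i := by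
          have := congrArg List.length hdrop
          simp at this; omega
        have h2 : ¬ pattern.length ≤ rest.length + 1 := by omega
        simp [pvScanB, h2]

-- ===== VERDICT (by name: the statement is the Claim_ definition above) =====
theorem find_subsequence_py_spec : Claim_equal_find_subsequence_py := by
  intro lines pattern start nw _
  unfold Spec_find_subsequence_py find_subsequence_py find_subsequence_py_alt
  by_cases hp : pattern = []
  · simp [hp]
  · rw [if_neg hp, if_neg hp]
    show pvLoopA lines pattern nw
          (PySem.List.pyRange (max 0 start)
            (max 0 ((lines.length : Int) - (pattern.length : Int) + 1)) 1)
        = pvScanB (if nw then pattern.map pvNormB else pattern)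
            (PySem.List.slice (if nw then lines.map pvNormB else lines) (some (max 0 start)) none)
            (max 0 start)
    rw [pvMapNorm nw lines, pvMapNorm nw pattern]
    have hst : (0 : Int) ≤ max 0 start := le_max_left _ _
    rw [PySem.List.slice_from _ hst]
    have hcast : ((max 0 start).toNat : Int) = max 0 start := Int.toNat_of_nonneg hst
    rw [← hcast]
    exact pvMain lines pattern nw hp lines.length (max 0 start).toNat (by omega)
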